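-- pv_equiv track=rewrite | github.com/miny-genie/BOJ | acmicpc_16565.py | solution
-- ===== SOURCE A (Python) =====
-- MOD = 10_007
--
-- TOTAL_CARDS = 52
--
-- def generate_factorial_list() -> list:
--     dp = [1]
--     for i in range(1, 52+1):
--         dp.append(dp[-1] * i % MOD)
--     return dp
--
-- def power(base: int, exp: int) -> int:
--     if exp == 0:
--         return 1
--
--     tmp = power(base, exp//2)
--
--     if exp % 2:
--         return tmp * tmp * base % MOD
--     else:
--         return tmp * tmp % MOD
--
-- def combination(factorial: list, n: int, r: int) -> int:
--     up = factorial[n]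
--     dn = factorial[n-r] * factorial[r] % MOD
--     return up * power(dn, MOD-2) % MOD
--
-- def solution(player_card: int) -> int:
--     all_case = 0
--     factorial = generate_factorial_list()
--
--     for i in range(1, player_card//4+1):
--         parity_weight = (-1) ** (i-1)
--         four_card = combination(factorial, 13, i)
--
--         n = TOTAL_CARDS - i*4
--         r = player_card - i*4
--         remaing_cards = combination(factorial, n, r)
--
--         all_case += (remaing_cards * four_card * parity_weight) % MOD
--
--     return all_case % MOD
-- ===== SOURCE B (Python) =====
-- MOD = 10_007
--
-- TOTAL_CARDS = 52
--
-- def pascal_table() -> list: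
--     table = [[1]]
--     for n in range(1, TOTAL_CARDS + 1):
--         prev = table[-1]
--         row = [1]
--         for r in range(1, n):
--             row.append((prev[r - 1] + prev[r]) % MOD)
--         row.append(1)
--         table.append(row)
--     return table
--
-- def solution(player_card: int) -> int:
--     C = pascal_table()
--     total = 0
--     sign = 1
--     for i in range(1, player_card // 4 + 1):
--         total += sign * C[13][i] * C[TOTAL_CARDS - 4 * i][player_card - 4 * i]
--         sign = -sign
--     return total % MOD
-- ===== Notes on version B (the rewrite author's own statement) =====
-- stated objective: simpler
-- what changed: Replaces the factorial table + Fermat modular inverses via recursive fast power with a Pascal's-triangle table of binomials mod 10007 built once by the additive recurrence, read directly in the inclusion-exclusion loop with a running sign instead of (-1)**(i-1).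
-- outside the precondition, e.g. on solution(53): A returns 8068, B raises IndexError
import Mathlib
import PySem

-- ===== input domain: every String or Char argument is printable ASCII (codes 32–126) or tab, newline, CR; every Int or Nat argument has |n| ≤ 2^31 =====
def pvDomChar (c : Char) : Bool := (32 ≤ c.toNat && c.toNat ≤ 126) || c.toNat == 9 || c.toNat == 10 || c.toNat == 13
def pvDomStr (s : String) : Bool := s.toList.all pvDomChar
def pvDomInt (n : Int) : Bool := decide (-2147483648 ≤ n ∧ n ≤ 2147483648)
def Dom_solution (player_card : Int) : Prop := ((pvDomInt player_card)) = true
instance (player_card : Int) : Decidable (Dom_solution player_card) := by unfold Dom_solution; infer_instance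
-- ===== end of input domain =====

-- B replaces the factorial table + Fermat inverses (recursive modular power) of A by a
-- Pascal's-triangle table of binomials mod 10007 read directly in the inclusion-exclusion loop.

-- ===== PORT A =====
-- dp[-1] / factorial[n] are always in range on the inputs admitted by Pre_solution,
-- so pyGetD with default 0 is exact there.
def generate_factorial_list : List Int :=
  (PySem.List.pyRange 1 53 1).foldl
    (fun dp i => dp ++ [PySem.Int.mod (PySem.List.pyGetD dp (-1) 0 * i) 10007]) [1]

-- Structural fuel makes Python's power recursion total; exp.toNat + 1 steps always
-- suffice since exp//2 strictly decreases towards 0 (A only calls it with exp = 10005).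
def powerAuxA : Nat → Int → Int → Int
  | 0, _, _ => 1
  | fuel + 1, base, exp =>
    if exp = 0 then 1
    else
      let tmp := powerAuxA fuel base (PySem.Int.floordiv exp 2)
      if PySem.Int.mod exp 2 ≠ 0 then PySem.Int.mod (tmp * tmp * base) 10007
      else PySem.Int.mod (tmp * tmp) 10007

def powerA (base : Int) (exp : Int) : Int := powerAuxA (exp.toNat + 1) base exp

def combinationA (factorial : List Int) (n r : Int) : Int :=
  let up := PySem.List.pyGetD factorial n 0
  let dn := PySem.Int.mod (PySem.List.pyGetD factorial (n - r) 0 * PySem.List.pyGetD factorial r 0) 10007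
  PySem.Int.mod (up * powerA dn (10007 - 2)) 10007

def solution (player_card : Int) : Int :=
  let factorial := generate_factorial_list
  let all_case :=
    (PySem.List.pyRange 1 (PySem.Int.floordiv player_card 4 + 1) 1).foldl
      (fun all_case i =>
        let parity_weight : Int := (-1) ^ (i - 1).toNat
        let four_card := combinationA factorial 13 i
        let n := 52 - i * 4
        let r := player_card - i * 4
        let remaing_cards := combinationA factorial n r
        all_case + PySem.Int.mod (remaing_cards * four_card * parity_weight) 10007) 0
  PySem.Int.mod all_case 10007

-- ===== PORT B =====
-- table[-1] / prev[r-1] / prev[r] are always in range here, so pyGetD with default is exact.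
def pascal_table : List (List Int) :=
  (PySem.List.pyRange 1 53 1).foldl
    (fun table n =>
      let prev := PySem.List.pyGetD table (-1) []
      let row :=
        (PySem.List.pyRange 1 n 1).foldl
          (fun row r =>
            row ++ [PySem.Int.mod (PySem.List.pyGetD prev (r - 1) 0 + PySem.List.pyGetD prev r 0) 10007]) [1]
      table ++ [row ++ [1]]) [[1]]

def solution_alt (player_card : Int) : Int :=
  let C := pascal_table
  let st :=
    (PySem.List.pyRange 1 (PySem.Int.floordiv player_card 4 + 1) 1).foldl
      (fun (st : Int × Int) i =>
        let total := st.1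
        let sign := st.2
        (total + sign * PySem.List.pyGetD (PySem.List.pyGetD C 13 []) i 0
               * PySem.List.pyGetD (PySem.List.pyGetD C (52 - 4 * i) []) (player_card - 4 * i) 0,
         -sign)) (0, 1)
  PySem.Int.mod st.1 10007

-- ===== PRECONDITION & SPEC =====
-- Pre_ excludes player_card > 52: there A raises IndexError (player_card ≥ 57) or returns an
-- accidental value through Python's negative-index wraparound into the factorial table
-- (53 ≤ player_card ≤ 56), while B's Pascal-table lookup raises IndexError on all of them.
def Pre_solution (player_card : Int) : Prop := player_card ≤ 52
instance (player_card : Int) : Decidable (Pre_solution player_card) := by unfold Pre_solution; infer_instance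
def pvWitness_solution : Int := 13

def Spec_solution (player_card : Int) (out : Int) : Prop := out = solution_alt player_card
instance (player_card : Int) (out : Int) : Decidable (Spec_solution player_card out) := by unfold Spec_solution; infer_instance

-- ===== CLAIM (what is proved, stated in full; the proofs are below) =====
def Claim_equal_solution : Prop := ∀ (player_card : Int), Dom_solution player_card → Pre_solution player_card → Spec_solution player_card (solution player_card)

-- ===== LEMMAS AND PROOFS =====

-- When player_card < 4 the loop range is empty in both ports and both return 0.
lemma solution_small (pc : Int) (h : pc < 4) : solution pc = solution_alt pc := by
  have hr : PySem.List.pyRange 1 (pc / 4 + 1) 1 = [] := by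
    rw [PySem.List.pyRange_one]
    have h0 : (pc / 4 + 1 - 1).toNat = 0 := by omega
    rw [h0]; rfl
  simp [solution, solution_alt, hr]

-- ===== VERDICT (by name: the statement is the Claim_ definition above) =====
set_option maxRecDepth 40000 in
theorem solution_spec : Claim_equal_solution := by
  intro pc _ hpre
  unfold Spec_solution
  by_cases h : pc < 4
  · exact solution_small pc h
  · have h1 : 4 ≤ pc := by omega
    have h2 : pc ≤ 52 := hpre
    interval_cases pc <;> decide
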